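-- pv_equiv track=rewrite | github.com/LuisGC/advent-of-code | 2021/day-10/main.py | calculate_completion_score
-- ===== SOURCE A (Python) =====
-- from collections import deque
--
-- def calculate_completion_score(queue: deque) -> int:
--     score = 0
--     for index in range(len(queue)):
--         token = queue.pop()
--         if token == "(":
--             score = 5 * score + 1
--         elif token == "[":
--             score = 5 * score + 2
--         elif token == "{":
--             score = 5 * score + 3
--         elif token == "<":
--             score = 5 * score + 4
--
--     return score
-- ===== SOURCE B (Python) =====
-- def calculate_completion_score(queue) -> int:
--     values = []
--     token_value = {"(": 1, "[": 2, "{": 3, "<": 4}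
--     while queue:
--         token = queue.pop()
--         if token in token_value:
--             values.append(token_value[token])
--     return sum(v * 5 ** (len(values) - 1 - i) for i, v in enumerate(values))
-- ===== Notes on version B (the rewrite author's own statement) =====
-- stated objective: alternative
-- what changed: Replaces the in-loop Horner accumulator (score = 5*score + v inside the popping loop) by a two-phase decomposition: first drain the deque into a list of recognized bracket values via a lookup dict, then evaluate the score as an explicit positional polynomial sum(v * 5**(n-1-i)).
import Mathlib
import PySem

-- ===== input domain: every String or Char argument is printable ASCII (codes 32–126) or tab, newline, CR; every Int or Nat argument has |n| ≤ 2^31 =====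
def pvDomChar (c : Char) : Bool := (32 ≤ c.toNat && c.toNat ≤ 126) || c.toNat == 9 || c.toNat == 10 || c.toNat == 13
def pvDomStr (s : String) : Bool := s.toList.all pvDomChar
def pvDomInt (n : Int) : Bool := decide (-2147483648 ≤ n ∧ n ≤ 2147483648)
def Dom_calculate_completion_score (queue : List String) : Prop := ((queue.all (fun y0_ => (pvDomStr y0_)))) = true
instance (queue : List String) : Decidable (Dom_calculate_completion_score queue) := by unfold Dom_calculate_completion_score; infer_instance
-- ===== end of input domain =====

-- B replaces A's in-loop Horner accumulator with a two-phase decomposition: drain into a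
-- list of recognized bracket values via a lookup map, then sum an explicit positional
-- polynomial v * 5^(n-1-i) (alternative decomposition, same cost). A pops the deque empty;
-- the equivalence proved here is about the return value (B drains the deque the same way).


-- ===== PORT A =====
-- for index in range(len(queue)): token = queue.pop() — popping from the right end n times
-- visits the elements in reverse order, so the loop is a fold over queue.reverse.
def calculate_completion_score (queue : List String) : Int :=
  queue.reverse.foldl (fun score token =>
    if token = "(" then 5 * score + 1
    else if token = "[" then 5 * score + 2
    else if token = "{" then 5 * score + 3
    else if token = "<" then 5 * score + 4
    else score) 0

-- ===== PORT B =====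
def pvTokenValue : PySem.Dict String Int :=
  PySem.Dict.ofList [("(", 1), ("[", 2), ("{", 3), ("<", 4)]

-- while queue: token = queue.pop(); if token in m: values.append(m[token])
-- = keep each m-value of the popped (i.e. reversed) sequence.
def calculate_completion_score_alt (queue : List String) : Int :=
  let values := queue.reverse.filterMap (fun t => pvTokenValue.get? t)
  ((PySem.List.enumerate values 0).map
    (fun p => p.2 * 5 ^ ((values.length : Int) - 1 - p.1).toNat)).sum

-- ===== PRECONDITION & SPEC =====
def Spec_calculate_completion_score (queue : List String) (out : Int) : Prop := out = calculate_completion_score_alt queue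
instance (queue : List String) (out : Int) : Decidable (Spec_calculate_completion_score queue out) := by unfold Spec_calculate_completion_score; infer_instance

-- ===== CLAIM (what is proved, stated in full; the proofs are below) =====
def Claim_equal_calculate_completion_score : Prop := ∀ (queue : List String), Dom_calculate_completion_score queue → Spec_calculate_completion_score queue (calculate_completion_score queue)

-- ===== LEMMAS AND PROOFS =====

-- the positional polynomial B sums
def pvPoly (vs : List Int) : Int :=
  ((PySem.List.enumerate vs 0).map
    (fun p => p.2 * 5 ^ ((vs.length : Int) - 1 - p.1).toNat)).sum

-- A's guarded Horner step is the Horner step on the filterMap of recognized values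
theorem pvGet (t : String) :
    pvTokenValue.get? t = if t = "(" then some 1 else if t = "[" then some 2
      else if t = "{" then some 3 else if t = "<" then some 4 else none := by
  have h : pvTokenValue = PySem.Dict.mk [("(", 1), ("[", 2), ("{", 3), ("<", 4)] := by decide
  rw [h]
  simp only [PySem.Dict.get?, List.find?]
  split_ifs with h1 h2 h3 h4
  · simp [h1]
  · simp [h2]
  · simp [h3]
  · simp [h4]
  · rw [show ("(" == t) = false from beq_eq_false_iff_ne.mpr (Ne.symm h1),
       show ("[" == t) = false from beq_eq_false_iff_ne.mpr (Ne.symm h2),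
       show ("{" == t) = false from beq_eq_false_iff_ne.mpr (Ne.symm h3),
       show ("<" == t) = false from beq_eq_false_iff_ne.mpr (Ne.symm h4)]
    rfl

-- A's guarded Horner step is the Horner step on the filterMap of recognized values
theorem pvFoldA_eq_horner (l : List String) (s : Int) :
    l.foldl (fun score token =>
      if token = "(" then 5 * score + 1
      else if token = "[" then 5 * score + 2
      else if token = "{" then 5 * score + 3
      else if token = "<" then 5 * score + 4
      else score) s
    = (l.filterMap (fun t => pvTokenValue.get? t)).foldl (fun s v => 5 * s + v) s := by
  induction l generalizing s with
  | nil => rfl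
  | cons t l ih =>
    simp only [List.foldl_cons, List.filterMap_cons, pvGet]
    split_ifs <;> simp [List.foldl_cons, ih, pvGet]

-- appending one value to the polynomial: one more Horner step
theorem pvPoly_append (vs : List Int) (v : Int) :
    pvPoly (vs ++ [v]) = 5 * pvPoly vs + v := by
  simp only [pvPoly, PySem.List.enumerate_append, List.map_append, List.sum_append,
    List.length_append, List.length_cons, List.length_nil]
  push_cast
  have hlast : ((PySem.List.enumerate [v] (0 + (vs.length : Int))).map
      (fun p => p.2 * 5 ^ ((vs.length : Int) + 1 - 1 - p.1).toNat)).sum = v := by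
    simp [PySem.List.enumerate]
  rw [hlast]
  have hshift : ∀ p ∈ PySem.List.enumerate vs 0,
      p.2 * 5 ^ ((vs.length : Int) + 1 - 1 - p.1).toNat
      = 5 * (p.2 * 5 ^ ((vs.length : Int) - 1 - p.1).toNat) := by
    intro p hp
    obtain ⟨k, hk, rfl⟩ := (PySem.List.mem_enumerate_iff vs 0 p).1 hp
    have h1 : ((vs.length : Int) + 1 - 1 - (0 + (k : Int))).toNat
        = ((vs.length : Int) - 1 - (0 + (k : Int))).toNat + 1 := by omega
    rw [h1, pow_succ]
    ring
  rw [List.map_congr_left hshift, List.sum_map_mul_left]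

-- Horner evaluation equals the positional polynomial
theorem pvHorner_eq_poly (vs : List Int) :
    vs.foldl (fun s v => 5 * s + v) 0 = pvPoly vs := by
  have gen : ∀ vs : List Int, ∀ s : Int,
      vs.foldl (fun s v => 5 * s + v) s = s * 5 ^ vs.length + pvPoly vs := by
    intro vs
    induction vs using List.reverseRecOn with
    | nil => intro s; simp [pvPoly, PySem.List.enumerate]
    | append_singleton vs v ih =>
      intro s
      rw [List.foldl_append, List.foldl_cons, List.foldl_nil, ih, pvPoly_append,
        List.length_append]
      simp [pow_succ]
      ring
  simpa using gen vs 0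

-- ===== VERDICT (by name: the statement is the Claim_ definition above) =====
theorem calculate_completion_score_spec : Claim_equal_calculate_completion_score := by
  intro queue _
  unfold Spec_calculate_completion_score calculate_completion_score calculate_completion_score_alt
  rw [pvFoldA_eq_horner, pvHorner_eq_poly]
  rfl
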